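-- pv_equiv track=rewrite | github.com/benquick123/code-profiling | code/batch-1/vse-naloge-brez-testov/DN7-M-111.py | dolzina_poti
-- ===== SOURCE A (Python) =====
-- def dolzina_poti(pot):
--     vsota = 0
--     for (x0, y0), (x1, y1) in zip(pot, pot[1:]):
--         if x1 != x0:
--             vsota += abs(x1 - x0)
--         if y1 != y0:
--             vsota += abs(y1 - y0)
--     return vsota
--
--     """
--     Vrni dolžino podane poti, vključno z vmesnimi polji.
--
--     Args:
--         pot (list of tuple): seznam koordinat polj
--
--     Returns:
--         int: dolžina poti
--     """
-- ===== SOURCE B (Python) =====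
-- def dolzina_poti(pot):
--     n = len(pot)
--     if n < 2:
--         return 0
--     if n == 2:
--         (x0, y0), (x1, y1) = pot
--         return abs(x1 - x0) + abs(y1 - y0)
--     m = n // 2
--     return dolzina_poti(pot[:m + 1]) + dolzina_poti(pot[m:])
-- ===== Notes on version B (the rewrite author's own statement) =====
-- stated objective: alternative
-- what changed: Replaces A's single linear pair-scan with guarded accumulation by a divide-and-conquer recursion: split the path at its midpoint (sharing the midpoint between the halves), recurse on each half, and add the two lengths, with a two-point path as the base case.
import Mathlib
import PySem

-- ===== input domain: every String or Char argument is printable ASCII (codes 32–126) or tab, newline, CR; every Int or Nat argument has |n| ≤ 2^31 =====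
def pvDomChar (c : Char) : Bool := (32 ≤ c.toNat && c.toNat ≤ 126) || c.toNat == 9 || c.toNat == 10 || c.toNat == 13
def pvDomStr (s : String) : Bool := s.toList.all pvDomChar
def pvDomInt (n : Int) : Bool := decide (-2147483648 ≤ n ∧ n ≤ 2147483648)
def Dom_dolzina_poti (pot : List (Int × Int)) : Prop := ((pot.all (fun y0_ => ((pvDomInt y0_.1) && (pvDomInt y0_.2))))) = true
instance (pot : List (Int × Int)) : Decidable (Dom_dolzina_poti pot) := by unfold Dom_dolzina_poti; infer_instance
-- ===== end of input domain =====

-- B: divide-and-conquer — split the path at its midpoint (shared by both halves),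
-- recurse on each half and add, instead of A's linear pair-scan; alternative structure, same result.

-- ===== PORT A =====
-- for (x0,y0),(x1,y1) in zip(pot, pot[1:]): guarded accumulation of abs differences
def dolzina_poti (pot : List (Int × Int)) : Int :=
  (pot.zip (PySem.List.slice pot (some 1) none)).foldl
    (fun vsota q =>
      let vsota := if q.2.1 ≠ q.1.1 then vsota + |q.2.1 - q.1.1| else vsota
      if q.2.2 ≠ q.1.2 then vsota + |q.2.2 - q.1.2| else vsota)
    0

-- ===== PORT B =====
-- helper for B's termination: both slices are strictly shorter than the path
theorem pv_slice_to_len_lt (pot : List (Int × Int)) (n m : Int)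
    (hn : n = pot.length) (hm : m = PySem.Int.floordiv n 2) (h2 : ¬ n < 2) (_h3 : ¬ n = 2) :
    (PySem.List.slice pot none (some (m + 1))).length < pot.length := by
  have hfd : m = n / 2 := by
    subst hm; exact PySem.Int.floordiv_eq_ediv_of_pos (by omega)
  rw [PySem.List.slice_to pot (by omega)]
  simp only [List.length_take]
  omega

theorem pv_slice_from_len_lt (pot : List (Int × Int)) (n m : Int)
    (hn : n = pot.length) (hm : m = PySem.Int.floordiv n 2) (h2 : ¬ n < 2) (h3 : ¬ n = 2) :
    (PySem.List.slice pot (some m) none).length < pot.length := by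
  have hfd : m = n / 2 := by
    subst hm; exact PySem.Int.floordiv_eq_ediv_of_pos (by omega)
  rw [PySem.List.slice_from pot (by omega)]
  simp only [List.length_drop]
  omega

def dolzina_poti_alt (pot : List (Int × Int)) : Int :=
  let n : Int := pot.length
  if h2 : n < 2 then 0
  else if h3 : n = 2 then
    match pot with
    | [(x0, y0), (x1, y1)] => |x1 - x0| + |y1 - y0|
    | _ => 0  -- unreachable: guarded by n == 2 (Python's tuple unpacking succeeds)
  else
    let m := PySem.Int.floordiv n 2
    dolzina_poti_alt (PySem.List.slice pot none (some (m + 1))) +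
    dolzina_poti_alt (PySem.List.slice pot (some m) none)
termination_by pot.length
decreasing_by
  · exact pv_slice_to_len_lt pot _ _ rfl rfl h2 h3
  · exact pv_slice_from_len_lt pot _ _ rfl rfl h2 h3

-- ===== PRECONDITION & SPEC =====
def Spec_dolzina_poti (pot : List (Int × Int)) (out : Int) : Prop := out = dolzina_poti_alt pot
instance (pot : List (Int × Int)) (out : Int) : Decidable (Spec_dolzina_poti pot out) := by unfold Spec_dolzina_poti; infer_instance

-- ===== CLAIM =====
def Claim_equal_dolzina_poti : Prop := ∀ (pot : List (Int × Int)), Dom_dolzina_poti pot → Spec_dolzina_poti pot (dolzina_poti pot)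

-- ===== LEMMAS AND PROOFS =====

-- reference value: sum of |dx|+|dy| over consecutive pairs, as a direct recursion
def pvS : List (Int × Int) → Int
  | p :: q :: t => |q.1 - p.1| + |q.2 - p.2| + pvS (q :: t)
  | _ => 0

-- A's guarded fold equals pvS
theorem pv_foldA_eq_S (l : List (Int × Int)) (a : Int) :
    (l.zip l.tail).foldl
      (fun vsota q =>
        let vsota := if q.2.1 ≠ q.1.1 then vsota + |q.2.1 - q.1.1| else vsota
        if q.2.2 ≠ q.1.2 then vsota + |q.2.2 - q.1.2| else vsota)
      a = a + pvS l := by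
  induction l generalizing a with
  | nil => simp [pvS]
  | cons p t ih =>
    cases t with
    | nil => simp [pvS]
    | cons q t' =>
      simp only [List.tail_cons, List.zip_cons_cons, List.foldl_cons, ih, pvS]
      split_ifs with h1 h2 h2 <;> simp_all [sub_self] <;> ring

-- splitting at a shared midpoint preserves pvS
theorem pv_S_split (xs : List (Int × Int)) (m : Nat) (hm : m + 1 ≤ xs.length) :
    pvS (xs.take (m + 1)) + pvS (xs.drop m) = pvS xs := by
  induction xs generalizing m with
  | nil => simp at hm
  | cons p t ih =>
    cases m with
    | zero => simp [pvS]
    | succ m' =>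
      cases t with
      | nil => simp at hm
      | cons q t' =>
        have hm' : m' + 1 ≤ (q :: t').length := by simpa using hm
        have := ih m' hm'
        simp only [List.take_succ_cons, List.drop_succ_cons] at *
        have hq : pvS (p :: q :: List.take m' t') = |q.1 - p.1| + |q.2 - p.2| + pvS (q :: List.take m' t') := rfl
        have hp : pvS (p :: q :: t') = |q.1 - p.1| + |q.2 - p.2| + pvS (q :: t') := rfl
        omega

-- B equals pvS (strong induction on the path length, following B's recursion)
theorem pv_alt_eq_S (pot : List (Int × Int)) : dolzina_poti_alt pot = pvS pot := by
  generalize hN : pot.length = N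
  induction N using Nat.strong_induction_on generalizing pot with
  | _ N ih =>
    rw [dolzina_poti_alt.eq_def]
    by_cases h2 : ((pot.length : Int) < 2)
    · rw [dif_pos h2]
      rcases pot with _ | ⟨p, _ | ⟨q, t⟩⟩
      · simp [pvS]
      · simp [pvS]
      · exfalso; simp at h2; omega
    · rw [dif_neg h2]
      by_cases h3 : ((pot.length : Int) = 2)
      · rw [dif_pos h3]
        have hl2 : pot.length = 2 := by exact_mod_cast h3
        obtain ⟨⟨x0, y0⟩, ⟨x1, y1⟩, rfl⟩ := List.length_eq_two.mp hl2
        simp [pvS]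
      · rw [dif_neg h3]
        have hfd : PySem.Int.floordiv ((pot.length : Int)) 2 = (pot.length : Int) / 2 :=
          PySem.Int.floordiv_eq_ediv_of_pos (by omega)
        have hge : 3 ≤ pot.length := by omega
        rw [hfd]
        show dolzina_poti_alt (PySem.List.slice pot none (some ((pot.length : Int) / 2 + 1))) +
            dolzina_poti_alt (PySem.List.slice pot (some ((pot.length : Int) / 2)) none) = pvS pot
        rw [PySem.List.slice_to pot (by omega), PySem.List.slice_from pot (by omega)]
        have hk : ((pot.length : Int) / 2).toNat = pot.length / 2 := by omega
        have hk1 : ((pot.length : Int) / 2 + 1).toNat = pot.length / 2 + 1 := by omega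
        rw [hk, hk1]
        rw [ih (pot.take (pot.length / 2 + 1)).length (by simp; omega) _ rfl,
            ih (pot.drop (pot.length / 2)).length (by simp; omega) _ rfl]
        exact pv_S_split pot (pot.length / 2) (by omega)

-- ===== VERDICT =====
theorem dolzina_poti_spec : Claim_equal_dolzina_poti := by
  intro pot _
  unfold Spec_dolzina_poti dolzina_poti
  rw [PySem.List.slice_from_one, pv_foldA_eq_S, pv_alt_eq_S]
  simp
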